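-- pv_equiv track=rewrite | github.com/Law-AI/ilsic | Codes/ILSIC/Ablation Study/Ablation Study on RAG Setups/RAG_gpt_k_stat_from_QQ-sBert.py | _hm_find_section_identifier
-- ===== SOURCE A (Python) =====
-- from typing import List, Dict, Any, Optional, Tuple
--
-- def _hm_normalize_identifier_token(token: str) -> str:
--     result = []
--     for c in token:
--         if c in "([":
--             break
--         if c.isalnum():
--             result.append(c)
--     return "".join(result)
--
-- def _hm_analyze_text_structure(text: str) -> Dict:
--     if not text:
--         return {}
--     words = text.split()
--     analysis = {
--         "words": words, "word_count": len(words),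
--         "numeric_words": [], "short_alphanum_words": [], "long_words": [],
--         "potential_identifiers": [],
--     }
--     for i, word in enumerate(words):
--         normalized = _hm_normalize_identifier_token(word)
--         if normalized.isdigit():
--             analysis["numeric_words"].append((i, normalized))
--         elif len(normalized) <= 5 and any(c.isdigit() for c in normalized):
--             analysis["short_alphanum_words"].append((i, normalized))
--         elif len(normalized) > 8:
--             analysis["long_words"].append((i, normalized))
--         if len(word) <= 6 and (any(c.isdigit() for c in normalized) or any(x in word for x in "()[].")):
--             analysis["potential_identifiers"].append((i, word))
--     return analysis
--
-- def _hm_find_section_identifier(text: str) -> Tuple[Optional[str], int]: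
--     analysis = _hm_analyze_text_structure(text)
--     words = analysis.get("words", [])
--     for pos, num in analysis.get("numeric_words", []):
--         if pos <= 2:
--             if pos + 1 < len(words):
--                 nxt = words[pos + 1]
--                 if len(nxt) == 1 and nxt.isalpha():
--                     return num + nxt, pos
--             return num, pos
--     for pos, word in analysis.get("short_alphanum_words", []):
--         if pos <= 3:
--             return word, pos
--     for pos, word in analysis.get("potential_identifiers", []):
--         if pos <= 3:
--             cleaned = _hm_normalize_identifier_token(word)
--             if cleaned:
--                 return cleaned, pos
--     return None, -1
-- ===== SOURCE B (Python) =====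
-- def _hm_normalize_identifier_token(token: str) -> str:
--     result = []
--     for c in token:
--         if c in "([":
--             break
--         if c.isalnum():
--             result.append(c)
--     return "".join(result)
--
-- def _hm_find_section_identifier(text):
--     words = text.split()
--     for i, w in enumerate(words[:3]):
--         num = _hm_normalize_identifier_token(w)
--         if num.isdigit():
--             if i + 1 < len(words):
--                 nxt = words[i + 1]
--                 if len(nxt) == 1 and nxt.isalpha():
--                     return num + nxt, i
--             return num, i
--     for i, w in enumerate(words[:4]):
--         norm = _hm_normalize_identifier_token(w)
--         if not norm.isdigit() and len(norm) <= 5 and any(c.isdigit() for c in norm):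
--             return norm, i
--     for i, w in enumerate(words[:4]):
--         norm = _hm_normalize_identifier_token(w)
--         if len(w) <= 6 and (any(c.isdigit() for c in norm) or any(x in w for x in "()[].")) and norm:
--             return norm, i
--     return None, -1
-- ===== Notes on version B (the rewrite author's own statement) =====
-- stated objective: simpler
-- what changed: B drops _hm_analyze_text_structure and the analysis dict entirely and instead runs three direct prefix passes over the first 3/4 words in priority order, normalizing tokens on the fly.
import Mathlib
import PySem

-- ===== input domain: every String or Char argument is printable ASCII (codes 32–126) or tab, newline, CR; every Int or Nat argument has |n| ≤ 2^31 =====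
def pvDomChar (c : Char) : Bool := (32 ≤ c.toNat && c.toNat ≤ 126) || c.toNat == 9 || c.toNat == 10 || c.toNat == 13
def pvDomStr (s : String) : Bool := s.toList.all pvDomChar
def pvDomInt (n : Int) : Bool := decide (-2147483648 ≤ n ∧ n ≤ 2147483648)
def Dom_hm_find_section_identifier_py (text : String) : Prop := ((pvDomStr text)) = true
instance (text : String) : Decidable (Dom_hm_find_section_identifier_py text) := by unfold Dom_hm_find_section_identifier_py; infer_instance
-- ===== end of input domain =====

-- B drops the analysis-dict construction entirely and runs three direct prefix passes
-- over the first 3/4 words in priority order (objective: simpler decomposition).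

-- ===== PORT A =====

-- _hm_normalize_identifier_token: loop over chars with break at '(' or '[', keep alnum
def normTok : List Char → List Char
  | [] => []
  | c :: rest =>
    if c = '(' ∨ c = '[' then []
    else if PySem.Chars.isalnum c then c :: normTok rest
    else normTok rest

-- body of the analysis loop of _hm_analyze_text_structure (long_words is built by A but
-- never read by _hm_find_section_identifier, so it is not tracked)
def analyzeStep (acc : List (Int × String) × List (Int × String) × List (Int × String))
    (p : Int × String) : List (Int × String) × List (Int × String) × List (Int × String) :=
  let normalized := normTok p.2.toList
  let acc :=
    if PySem.Chars.strIsdigit normalized then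
      (acc.1 ++ [(p.1, String.ofList normalized)], acc.2.1, acc.2.2)
    else if normalized.length ≤ 5 ∧ normalized.any PySem.Chars.isdigit then
      (acc.1, acc.2.1 ++ [(p.1, String.ofList normalized)], acc.2.2)
    else acc
  if p.2.toList.length ≤ 6 ∧
      (normalized.any PySem.Chars.isdigit ∨ "()[].".toList.any (fun x => PySem.Chars.isIn [x] p.2.toList)) then
    (acc.1, acc.2.1, acc.2.2 ++ [p])
  else acc

-- _hm_analyze_text_structure, restricted to the fields the caller reads
def hm_analyze (text : String) :
    List String × List (Int × String) × List (Int × String) × List (Int × String) :=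
  if text = "" then ([], [], [], [])
  else
    let words := PySem.Str.split₀ text
    let t := (PySem.List.enumerate words).foldl analyzeStep ([], [], [])
    (words, t.1, t.2.1, t.2.2)

-- first loop of _hm_find_section_identifier (over numeric_words)
def scanNum (words : List String) : List (Int × String) → Option (Option String × Int)
  | [] => none
  | (pos, num) :: rest =>
    if pos ≤ 2 then
      some (if pos + 1 < (words.length : Int) then
              let nxt := PySem.List.pyGetD words (pos + 1) ""
              if nxt.toList.length = 1 ∧ PySem.Chars.strIsalpha nxt.toList then
                (some (String.ofList (num.toList ++ nxt.toList)), pos)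
              else (some num, pos)
            else (some num, pos))
    else scanNum words rest

-- second loop (over short_alphanum_words)
def scanShort : List (Int × String) → Option (Option String × Int)
  | [] => none
  | (pos, w) :: rest => if pos ≤ 3 then some (some w, pos) else scanShort rest

-- third loop (over potential_identifiers); empty `cleaned` continues the loop
def scanPot : List (Int × String) → Option (Option String × Int)
  | [] => none
  | (pos, word) :: rest =>
    if pos ≤ 3 then
      let cleaned := normTok word.toList
      if ¬ cleaned.isEmpty then some (some (String.ofList cleaned), pos) else scanPot rest
    else scanPot rest

def hm_find_section_identifier_py (text : String) : Option String × Int :=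
  let a := hm_analyze text
  match scanNum a.1 a.2.1 with
  | some r => r
  | none =>
    match scanShort a.2.2.1 with
    | some r => r
    | none =>
      match scanPot a.2.2.2 with
      | some r => r
      | none => (none, -1)

-- ===== PORT B =====

-- for i, w in enumerate(words[:3]): numeric-prefix pass
def pass1 (words : List String) : List (Int × String) → Option (Option String × Int)
  | [] => none
  | (i, w) :: rest =>
    let num := normTok w.toList
    if PySem.Chars.strIsdigit num then
      some (if i + 1 < (words.length : Int) then
              let nxt := PySem.List.pyGetD words (i + 1) ""
              if nxt.toList.length = 1 ∧ PySem.Chars.strIsalpha nxt.toList then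
                (some (String.ofList (num ++ nxt.toList)), i)
              else (some (String.ofList num), i)
            else (some (String.ofList num), i))
    else pass1 words rest

-- for i, w in enumerate(words[:4]): short alphanumeric pass
def pass2 : List (Int × String) → Option (Option String × Int)
  | [] => none
  | (i, w) :: rest =>
    let norm := normTok w.toList
    if ¬ PySem.Chars.strIsdigit norm ∧ (norm.length ≤ 5 ∧ norm.any PySem.Chars.isdigit) then
      some (some (String.ofList norm), i)
    else pass2 rest

-- for i, w in enumerate(words[:4]): punctuation/digit identifier pass
def pass3 : List (Int × String) → Option (Option String × Int)
  | [] => none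
  | (i, w) :: rest =>
    let norm := normTok w.toList
    if (w.toList.length ≤ 6 ∧
        (norm.any PySem.Chars.isdigit ∨ "()[].".toList.any (fun x => PySem.Chars.isIn [x] w.toList))) ∧
        ¬ norm.isEmpty then
      some (some (String.ofList norm), i)
    else pass3 rest

def hm_find_section_identifier_py_alt (text : String) : Option String × Int :=
  let words := PySem.Str.split₀ text
  match pass1 words (PySem.List.enumerate (PySem.List.slice words none (some 3))) with
  | some r => r
  | none =>
    match pass2 (PySem.List.enumerate (PySem.List.slice words none (some 4))) with
    | some r => r
    | none =>
      match pass3 (PySem.List.enumerate (PySem.List.slice words none (some 4))) with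
      | some r => r
      | none => (none, -1)

-- ===== PRECONDITION & SPEC =====
def Spec_hm_find_section_identifier_py (text : String) (out : Option String × Int) : Prop := out = hm_find_section_identifier_py_alt text
instance (text : String) (out : Option String × Int) : Decidable (Spec_hm_find_section_identifier_py text out) := by unfold Spec_hm_find_section_identifier_py; infer_instance

-- ===== CLAIM (what is proved, stated in full; the proofs are below) =====
def Claim_equal_hm_find_section_identifier_py : Prop := ∀ (text : String), Dom_hm_find_section_identifier_py text → Spec_hm_find_section_identifier_py text (hm_find_section_identifier_py text)

-- ===== LEMMAS AND PROOFS =====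

-- closed forms for the three lists the analysis fold builds
def numOf : List (Int × String) → List (Int × String)
  | [] => []
  | (i, w) :: rest =>
    if PySem.Chars.strIsdigit (normTok w.toList) then
      (i, String.ofList (normTok w.toList)) :: numOf rest
    else numOf rest

def shortOf : List (Int × String) → List (Int × String)
  | [] => []
  | (i, w) :: rest =>
    if ¬ PySem.Chars.strIsdigit (normTok w.toList) ∧
        ((normTok w.toList).length ≤ 5 ∧ (normTok w.toList).any PySem.Chars.isdigit) then
      (i, String.ofList (normTok w.toList)) :: shortOf rest
    else shortOf rest

def potOf : List (Int × String) → List (Int × String)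
  | [] => []
  | (i, w) :: rest =>
    if w.toList.length ≤ 6 ∧
        ((normTok w.toList).any PySem.Chars.isdigit ∨
          "()[].".toList.any (fun x => PySem.Chars.isIn [x] w.toList)) then
      (i, w) :: potOf rest
    else potOf rest

lemma foldl_analyzeStep (l : List (Int × String)) :
    ∀ a b c, l.foldl analyzeStep (a, b, c) = (a ++ numOf l, b ++ shortOf l, c ++ potOf l) := by
  induction l with
  | nil => intro a b c; simp [numOf, shortOf, potOf]
  | cons p rest ih =>
    intro a b c
    obtain ⟨i, w⟩ := p
    by_cases h1 : PySem.Chars.strIsdigit (normTok w.toList) <;>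
      by_cases h2 : (normTok w.toList).length ≤ 5 ∧ (normTok w.toList).any PySem.Chars.isdigit <;>
      by_cases h3 : w.toList.length ≤ 6 ∧
        ((normTok w.toList).any PySem.Chars.isdigit ∨
          "()[].".toList.any (fun x => PySem.Chars.isIn [x] w.toList)) <;>
      simp [List.foldl_cons, analyzeStep, numOf, shortOf, potOf, h1, h2, ih] <;>
      split_ifs <;> simp_all

lemma hm_analyze_closed (text : String) :
    hm_analyze text =
      (PySem.Str.split₀ text,
       numOf (PySem.List.enumerate (PySem.Str.split₀ text)),
       shortOf (PySem.List.enumerate (PySem.Str.split₀ text)),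
       potOf (PySem.List.enumerate (PySem.Str.split₀ text))) := by
  by_cases h : text = ""
  · subst h
    have : PySem.Str.split₀ "" = [] := rfl
    simp [hm_analyze, this, numOf, shortOf, potOf]
  · simp [hm_analyze, h, foldl_analyzeStep]

-- scans return none once every position is past the cut-off
lemma scanNum_high (W : List String) (l : List String) :
    ∀ s : Int, 3 ≤ s → scanNum W (numOf (PySem.List.enumerate l s)) = none := by
  induction l with
  | nil => intro s hs; simp [PySem.List.enumerate_nil, numOf, scanNum]
  | cons x rest ih =>
    intro s hs
    rw [PySem.List.enumerate_cons]
    simp only [numOf]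
    by_cases h : PySem.Chars.strIsdigit (normTok x.toList)
    · rw [if_pos h]; simp only [scanNum]; rw [if_neg (by omega : ¬ s ≤ 2)]
      exact ih (s + 1) (by omega)
    · rw [if_neg h]; exact ih (s + 1) (by omega)

lemma scanShort_high (l : List String) :
    ∀ s : Int, 4 ≤ s → scanShort (shortOf (PySem.List.enumerate l s)) = none := by
  induction l with
  | nil => intro s hs; simp [PySem.List.enumerate_nil, shortOf, scanShort]
  | cons x rest ih =>
    intro s hs
    rw [PySem.List.enumerate_cons]
    simp only [shortOf]
    by_cases h : ¬ PySem.Chars.strIsdigit (normTok x.toList) ∧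
        ((normTok x.toList).length ≤ 5 ∧ (normTok x.toList).any PySem.Chars.isdigit)
    · rw [if_pos h]; simp only [scanShort]; rw [if_neg (by omega : ¬ s ≤ 3)]
      exact ih (s + 1) (by omega)
    · rw [if_neg h]; exact ih (s + 1) (by omega)

lemma scanPot_high (l : List String) :
    ∀ s : Int, 4 ≤ s → scanPot (potOf (PySem.List.enumerate l s)) = none := by
  induction l with
  | nil => intro s hs; simp [PySem.List.enumerate_nil, potOf, scanPot]
  | cons x rest ih =>
    intro s hs
    rw [PySem.List.enumerate_cons]
    simp only [potOf]
    by_cases h : x.toList.length ≤ 6 ∧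
        ((normTok x.toList).any PySem.Chars.isdigit ∨
          "()[].".toList.any (fun c => PySem.Chars.isIn [c] x.toList))
    · rw [if_pos h]; simp only [scanPot]; rw [if_neg (by omega : ¬ s ≤ 3)]
      exact ih (s + 1) (by omega)
    · rw [if_neg h]; exact ih (s + 1) (by omega)

lemma eqNum (W : List String) (l : List String) :
    ∀ (n : Nat) (s : Int), s = 3 - n →
      scanNum W (numOf (PySem.List.enumerate l s)) =
        pass1 W (PySem.List.enumerate (l.take n) s) := by
  induction l with
  | nil => intro n s _; simp [PySem.List.enumerate_nil, numOf, scanNum, pass1]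
  | cons x rest ih =>
    intro n s hs
    cases n with
    | zero =>
      simp only [List.take_zero, PySem.List.enumerate_nil, pass1]
      exact scanNum_high W (x :: rest) s (by omega)
    | succ m =>
      have hs2 : s ≤ 2 := by omega
      rw [List.take_succ_cons, PySem.List.enumerate_cons, PySem.List.enumerate_cons]
      simp only [numOf, pass1]
      by_cases h : PySem.Chars.strIsdigit (normTok x.toList)
      · simp [scanNum, h, hs2]
      · rw [if_neg h, if_neg h]; exact ih m (s + 1) (by omega)

lemma eqShort (l : List String) :
    ∀ (n : Nat) (s : Int), s = 4 - n →
      scanShort (shortOf (PySem.List.enumerate l s)) =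
        pass2 (PySem.List.enumerate (l.take n) s) := by
  induction l with
  | nil => intro n s _; simp [PySem.List.enumerate_nil, shortOf, scanShort, pass2]
  | cons x rest ih =>
    intro n s hs
    cases n with
    | zero =>
      simp only [List.take_zero, PySem.List.enumerate_nil, pass2]
      exact scanShort_high (x :: rest) s (by omega)
    | succ m =>
      have hs3 : s ≤ 3 := by omega
      rw [List.take_succ_cons, PySem.List.enumerate_cons, PySem.List.enumerate_cons]
      simp only [shortOf, pass2]
      by_cases h : ¬ PySem.Chars.strIsdigit (normTok x.toList) ∧
          ((normTok x.toList).length ≤ 5 ∧ (normTok x.toList).any PySem.Chars.isdigit)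
      · simp [scanShort, h, hs3]
      · rw [if_neg h, if_neg h]; exact ih m (s + 1) (by omega)

lemma eqPot (l : List String) :
    ∀ (n : Nat) (s : Int), s = 4 - n →
      scanPot (potOf (PySem.List.enumerate l s)) =
        pass3 (PySem.List.enumerate (l.take n) s) := by
  induction l with
  | nil => intro n s _; simp [PySem.List.enumerate_nil, potOf, scanPot, pass3]
  | cons x rest ih =>
    intro n s hs
    cases n with
    | zero =>
      simp only [List.take_zero, PySem.List.enumerate_nil, pass3]
      exact scanPot_high (x :: rest) s (by omega)
    | succ m =>
      have hs3 : s ≤ 3 := by omega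
      rw [List.take_succ_cons, PySem.List.enumerate_cons, PySem.List.enumerate_cons]
      simp only [potOf, pass3]
      by_cases h : x.toList.length ≤ 6 ∧
          ((normTok x.toList).any PySem.Chars.isdigit ∨
            "()[].".toList.any (fun c => PySem.Chars.isIn [c] x.toList))
      · rw [if_pos h]
        simp only [scanPot]
        rw [if_pos hs3]
        by_cases he : (normTok x.toList).isEmpty
        · rw [if_neg (fun hn => hn he), if_neg (fun hc => hc.2 he)]
          exact ih m (s + 1) (by omega)
        · rw [if_pos he, if_pos ⟨h, he⟩]
      · rw [if_neg h, if_neg (fun hc => h hc.1)]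
        exact ih m (s + 1) (by omega)

-- ===== VERDICT (by name: the statement is the Claim_ definition above) =====
theorem hm_find_section_identifier_py_spec : Claim_equal_hm_find_section_identifier_py := by
  intro text _
  unfold Spec_hm_find_section_identifier_py
  unfold hm_find_section_identifier_py hm_find_section_identifier_py_alt
  rw [hm_analyze_closed]
  have h3 : PySem.List.slice (PySem.Str.split₀ text) none (some 3) = (PySem.Str.split₀ text).take 3 := by
    rw [PySem.List.slice_to _ (by norm_num)]; rfl
  have h4 : PySem.List.slice (PySem.Str.split₀ text) none (some 4) = (PySem.Str.split₀ text).take 4 := by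
    rw [PySem.List.slice_to _ (by norm_num)]; rfl
  have e1 := eqNum (PySem.Str.split₀ text) (PySem.Str.split₀ text) 3 0 (by norm_num)
  have e2 := eqShort (PySem.Str.split₀ text) 4 0 (by norm_num)
  have e3 := eqPot (PySem.Str.split₀ text) 4 0 (by norm_num)
  simp only [h3, h4, e1, e2, e3]
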